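-- pv_equiv track=rewrite | github.com/0815Sailsman/AdventOfCode | Python/2021/09/main.py | mark_basins
-- ===== SOURCE A (Python) =====
-- def mark_basins(pdata):
--     data = pdata
--     basin_counter = 0
--     for yind in range(len(data)):
--         for xind in range(len(data[yind])):
--             # IDs will be numbers > 999
--             if (not data[yind][xind] > 999) and data[yind][xind] != 9:
--                 data = path(data, yind, xind, basin_counter+1000)
--             basin_counter += 1
--     return data
--
-- def path(pdata, yind, xind, id):
--     data = pdata
--     # Set current field to id
--     data[yind][xind] = id
--     # Check if there is a top field. If there is a field that has not been marked and isnt a wall -> recursion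
--     if yind > 0:
--         if (not data[yind-1][xind] > 999) and data[yind-1][xind] != 9:
--             data = path(data, yind-1, xind, id)
--     if xind < len(data[yind]) - 1:
--         if (not data[yind][xind+1] > 999) and data[yind][xind+1] != 9:
--             data = path(data, yind, xind+1, id)
--     if yind < len(data) - 1:
--         if (not data[yind+1][xind] > 999) and data[yind+1][xind] != 9:
--             data = path(data, yind+1, xind, id)
--     if xind > 0:
--         if (not data[yind][xind-1] > 999) and data[yind][xind-1] != 9:
--             data = path(data, yind, xind-1, id)
--     return data
-- ===== SOURCE B (Python) =====
-- # B: same outer scan, but the fill is an iterative explicit-stack flood fill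
-- # (bounds checked at push, qualification at pop) instead of A's recursion.
-- # Like A, mutates pdata in place; equivalence is about the return value.
-- def mark_basins(pdata):
--     data = pdata
--     basin_counter = 0
--     for yind in range(len(data)):
--         for xind in range(len(data[yind])):
--             stack = [(yind, xind)]
--             while stack:
--                 y, x = stack.pop()
--                 if (not data[y][x] > 999) and data[y][x] != 9:
--                     data[y][x] = basin_counter + 1000
--                     if x > 0:
--                         stack.append((y, x - 1))
--                     if y < len(data) - 1:
--                         stack.append((y + 1, x))
--                     if x < len(data[y]) - 1:
--                         stack.append((y, x + 1))
--                     if y > 0: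
--                         stack.append((y - 1, x))
--             basin_counter += 1
--     return data
-- ===== Notes on version B (the rewrite author's own statement) =====
-- stated objective: alternative
-- what changed: Replaces A's mutually-recursive depth-first flood fill (function `path`) by an iterative flood fill with an explicit stack inside the same double scan, so B never recurses (no RecursionError on deep basins).
-- outside the precondition, e.g. on mark_basins([[9, 9], [9]]): A returns [[9, 9], [9]], B returns [[9, 9], [9]]
import Mathlib
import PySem

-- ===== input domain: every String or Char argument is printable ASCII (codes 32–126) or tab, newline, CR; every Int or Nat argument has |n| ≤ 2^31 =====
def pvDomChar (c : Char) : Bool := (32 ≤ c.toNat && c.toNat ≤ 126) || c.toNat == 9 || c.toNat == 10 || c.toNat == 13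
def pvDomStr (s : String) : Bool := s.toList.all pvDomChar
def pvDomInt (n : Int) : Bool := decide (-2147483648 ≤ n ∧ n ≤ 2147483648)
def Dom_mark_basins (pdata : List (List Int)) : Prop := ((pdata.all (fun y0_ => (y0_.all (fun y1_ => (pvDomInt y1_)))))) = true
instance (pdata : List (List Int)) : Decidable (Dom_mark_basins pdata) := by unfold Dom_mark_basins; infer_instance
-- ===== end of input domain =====

-- B replaces A's recursive flood fill ("path") by an iterative explicit-stack flood fill
-- inside the same double scan; both Pythons mutate pdata in place, the equivalence proved
-- here is about the return value.

-- ===== PORT A =====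
-- shared helpers: grid read (indices are always in range when used, so getD is exact),
-- the start/continue test `(not v > 999) and v != 9`, and in-place cell assignment.
def pvGetv (g : List (List Int)) (y x : Nat) : Int := (g.getD y []).getD x 0

def pvP (v : Int) : Bool := decide (v ≤ 999) && decide (v ≠ 9)

def pvQual (g : List (List Int)) (y x : Nat) : Bool := pvP (pvGetv g y x)

def pvMark (g : List (List Int)) (y x : Nat) (v : Int) : List (List Int) :=
  g.set y ((g.getD y []).set x v)

-- A's recursive `path`; `fuel` is only a totality guard (one unit per nested call;
-- the callers pass more fuel than there are qualifying cells, so 0 is never reached).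
def pvPath (fuel : Nat) (g : List (List Int)) (yind xind : Nat) (id : Int) : List (List Int) :=
  match fuel with
  | 0 => g
  | f + 1 =>
    let d0 := pvMark g yind xind id
    let d1 := if 0 < yind then
        (if pvQual d0 (yind - 1) xind then pvPath f d0 (yind - 1) xind id else d0) else d0
    -- python `xind < len(data[yind]) - 1` over ints = `xind + 1 < len` over Nat
    let d2 := if xind + 1 < (d1.getD yind []).length then
        (if pvQual d1 yind (xind + 1) then pvPath f d1 yind (xind + 1) id else d1) else d1
    let d3 := if yind + 1 < d2.length then
        (if pvQual d2 (yind + 1) xind then pvPath f d2 (yind + 1) xind id else d2) else d2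
    let d4 := if 0 < xind then
        (if pvQual d3 yind (xind - 1) then pvPath f d3 yind (xind - 1) id else d3) else d3
    d4

def mark_basins (pdata : List (List Int)) : List (List Int) :=
  let fuel := pdata.foldl (fun a r => a + r.length) 0 + 1
  ((List.range pdata.length).foldl (fun (st : List (List Int) × Nat) yind =>
      (List.range (st.1.getD yind []).length).foldl (fun (st2 : List (List Int) × Nat) xind =>
        ((if pvQual st2.1 yind xind then
            pvPath fuel st2.1 yind xind ((st2.2 : Int) + 1000) else st2.1), st2.2 + 1)) st)
    (pdata, 0)).1

-- ===== PORT B =====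
-- B's explicit-stack flood fill: pop a cell, if it still qualifies mark it and push the
-- in-bounds neighbours (top of stack = head of list; pop order up, right, down, left).
-- `fuel` is only a totality guard (one unit per pop; callers pass enough).
def pvFill (fuel : Nat) (g : List (List Int)) (stack : List (Nat × Nat)) (id : Int) :
    List (List Int) :=
  match stack with
  | [] => g
  | (y, x) :: rest =>
    match fuel with
    | 0 => g
    | f + 1 =>
      if pvQual g y x then
        let d0 := pvMark g y x id
        pvFill f d0
          ((if 0 < y then [(y - 1, x)] else []) ++
           (if x + 1 < (d0.getD y []).length then [(y, x + 1)] else []) ++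
           (if y + 1 < d0.length then [(y + 1, x)] else []) ++
           (if 0 < x then [(y, x - 1)] else []) ++ rest) id
      else pvFill f g rest id

def mark_basins_alt (pdata : List (List Int)) : List (List Int) :=
  let fuel := 5 * pdata.foldl (fun a r => a + r.length) 0 + 2
  ((List.range pdata.length).foldl (fun (st : List (List Int) × Nat) yind =>
      (List.range (st.1.getD yind []).length).foldl (fun (st2 : List (List Int) × Nat) xind =>
        (pvFill fuel st2.1 [(yind, xind)] ((st2.2 : Int) + 1000), st2.2 + 1)) st)
    (pdata, 0)).1

-- ===== PRECONDITION & SPEC =====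
-- Pre_ excludes ragged grids (rows of unequal length), on which A's unguarded neighbour
-- accesses can raise IndexError.
def Pre_mark_basins (pdata : List (List Int)) : Prop :=
  ∀ r ∈ pdata, r.length = (pdata.headD []).length

instance (pdata : List (List Int)) : Decidable (Pre_mark_basins pdata) := by
  unfold Pre_mark_basins; infer_instance

def pvWitness_mark_basins : List (List Int) := [[0, 9], [5, 9]]

def Spec_mark_basins (pdata : List (List Int)) (out : List (List Int)) : Prop := out = mark_basins_alt pdata
instance (pdata : List (List Int)) (out : List (List Int)) : Decidable (Spec_mark_basins pdata out) := by unfold Spec_mark_basins; infer_instance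

-- ===== CLAIM (what is proved, stated in full; the proofs are below) =====
def Claim_equal_mark_basins : Prop := ∀ (pdata : List (List Int)), Dom_mark_basins pdata → Pre_mark_basins pdata → Spec_mark_basins pdata (mark_basins pdata)

-- ===== LEMMAS AND PROOFS =====

-- every row has length W
def pvRect (g : List (List Int)) (W : Nat) : Prop := ∀ r ∈ g, r.length = W

-- number of qualifying cells
def pvQc (g : List (List Int)) : Nat := (g.map (List.countP pvP)).sum

theorem pv_mark_oob {g : List (List Int)} {y : Nat} (hy : ¬ y < g.length) (x : Nat) (v : Int) :
    pvMark g y x v = g :=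
  List.set_eq_of_length_le (by omega)

theorem pv_length_mark (g : List (List Int)) (y x : Nat) (v : Int) :
    (pvMark g y x v).length = g.length := by
  simp [pvMark]

theorem pv_getD_length_rect {g : List (List Int)} {W : Nat} (h : pvRect g W) {y : Nat}
    (hy : y < g.length) : (g.getD y []).length = W := by
  rw [List.getD_eq_getElem _ _ hy]
  exact h _ (List.getElem_mem hy)

theorem pv_rect_mark {g : List (List Int)} {W : Nat} (h : pvRect g W) (y x : Nat) (v : Int) :
    pvRect (pvMark g y x v) W := by
  by_cases hy : y < g.length
  · intro r hr
    rcases List.mem_or_eq_of_mem_set hr with h1 | h1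
    · exact h r h1
    · subst h1
      rw [List.length_set]
      exact h _ (by rw [List.getD_eq_getElem _ _ hy]; exact List.getElem_mem hy)
  · rw [pv_mark_oob hy]; exact h

theorem pv_countP_set (l : List Int) (x : Nat) (hx : x < l.length) (v : Int) :
    l.countP pvP + (if pvP v then 1 else 0) = (l.set x v).countP pvP + (if pvP l[x] then 1 else 0) := by
  induction l generalizing x with
  | nil => simp at hx
  | cons a t ih =>
    cases x with
    | zero =>
      simp only [List.set_cons_zero, List.countP_cons, List.getElem_cons_zero]
      split_ifs <;> omega
    | succ m =>
      simp only [List.set_cons_succ, List.countP_cons, List.getElem_cons_succ]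
      have := ih m (by simpa using hx)
      split_ifs at * <;> omega

theorem pv_qc_set (g : List (List Int)) {y x : Nat} (hy : y < g.length)
    (hx : x < (g.getD y []).length) (v : Int) :
    pvQc g + (if pvP v then 1 else 0) =
      pvQc (pvMark g y x v) + (if pvQual g y x then 1 else 0) := by
  unfold pvQc pvMark pvQual pvGetv
  induction g generalizing y with
  | nil => simp at hy
  | cons r t ih =>
    cases y with
    | zero =>
      simp only [List.getD_cons_zero] at hx ⊢
      simp only [List.set_cons_zero, List.map_cons, List.sum_cons]
      have h1 := pv_countP_set r x hx v
      rw [List.getD_eq_getElem _ _ hx]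
      omega
    | succ m =>
      simp only [List.getD_cons_succ] at hx ⊢
      simp only [List.set_cons_succ, List.map_cons, List.sum_cons]
      have h1 := ih (by simpa using hy) hx
      omega

theorem pv_mark_oob_x {g : List (List Int)} {y x : Nat}
    (hx : ¬ x < (g.getD y []).length) (v : Int) : pvMark g y x v = g := by
  unfold pvMark
  have h1 : (g.getD y []).set x v = g.getD y [] :=
    List.set_eq_of_length_le (l := g.getD y []) (by omega)
  rw [h1]
  by_cases hy : y < g.length
  · rw [List.getD_eq_getElem _ _ hy]
    exact List.set_getElem_self hy
  · exact List.set_eq_of_length_le (by omega)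

theorem pv_qc_mark_le {g : List (List Int)} {v : Int} (hv : pvP v = false) (y x : Nat) :
    pvQc (pvMark g y x v) ≤ pvQc g := by
  by_cases hy : y < g.length
  · by_cases hx : x < (g.getD y []).length
    · have h2 := pv_qc_set g hy hx v
      simp [hv] at h2
      split_ifs at h2 <;> omega
    · rw [pv_mark_oob_x hx]
  · rw [pv_mark_oob hy]

theorem pv_qc_mark_lt {g : List (List Int)} {y x : Nat} {v : Int}
    (hv : pvP v = false) (hy : y < g.length) (hx : x < (g.getD y []).length)
    (hq : pvQual g y x = true) :
    pvQc (pvMark g y x v) < pvQc g := by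
  have := pv_qc_set g hy hx v
  rw [hv, hq] at this
  simp at this
  omega

theorem pv_qc_pos {g : List (List Int)} {y x : Nat}
    (hy : y < g.length) (hx : x < (g.getD y []).length) (hq : pvQual g y x = true) :
    1 ≤ pvQc g := by
  have := pv_qc_set g hy hx 1000
  rw [hq] at this
  have h1000 : pvP 1000 = false := by decide
  rw [h1000] at this
  simp at this
  omega

-- compositional view of one layer of pvPath
def pvSg (f : Nat) (id : Int) (a b : Nat) (c : List (List Int) → Prop) [DecidablePred c]
    (h : List (List Int)) : List (List Int) :=
  if c h then (if pvQual h a b then pvPath f h a b id else h) else h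

theorem pvPath_succ (f : Nat) (g : List (List Int)) (y x : Nat) (id : Int) :
    pvPath (f + 1) g y x id =
      pvSg f id y (x - 1) (fun _ => 0 < x)
        (pvSg f id (y + 1) x (fun h => y + 1 < h.length)
          (pvSg f id y (x + 1) (fun h => x + 1 < (h.getD y []).length)
            (pvSg f id (y - 1) x (fun _ => 0 < y) (pvMark g y x id)))) := rfl

theorem pv_length_path (f : Nat) (g : List (List Int)) (y x : Nat) (id : Int) :
    (pvPath f g y x id).length = g.length := by
  induction f generalizing g y x with
  | zero => rfl
  | succ f ih =>
    rw [pvPath_succ]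
    have hS : ∀ (a b : Nat) (c : List (List Int) → Prop) (inst : DecidablePred c)
        (h : List (List Int)), (pvSg f id a b c h).length = h.length := by
      intro a b c inst h
      unfold pvSg
      split_ifs <;> simp [ih]
    rw [hS, hS, hS, hS, pv_length_mark]

theorem pv_rect_path {W : Nat} (f : Nat) {g : List (List Int)} (h : pvRect g W)
    (y x : Nat) (id : Int) : pvRect (pvPath f g y x id) W := by
  induction f generalizing g y x with
  | zero => exact h
  | succ f ih =>
    rw [pvPath_succ]
    have hS : ∀ (a b : Nat) (c : List (List Int) → Prop) (inst : DecidablePred c)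
        (h' : List (List Int)), pvRect h' W → pvRect (pvSg f id a b c h') W := by
      intro a b c inst h' hh
      unfold pvSg
      split_ifs
      · exact ih hh _ _
      · exact hh
      · exact hh
    exact hS _ _ _ _ _ (hS _ _ _ _ _ (hS _ _ _ _ _ (hS _ _ _ _ _ (pv_rect_mark h y x id))))

theorem pv_qc_path_le {id : Int} (hv : pvP id = false) :
    ∀ (f : Nat) (g : List (List Int)) (y x : Nat), pvQc (pvPath f g y x id) ≤ pvQc g := by
  intro f
  induction f with
  | zero => intro g y x; exact le_rfl
  | succ f ih =>
    intro g y x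
    rw [pvPath_succ]
    have hS : ∀ (a b : Nat) (c : List (List Int) → Prop) (inst : DecidablePred c)
        (h' : List (List Int)), pvQc (pvSg f id a b c h') ≤ pvQc h' := by
      intro a b c inst h'
      unfold pvSg
      split_ifs
      · exact ih _ _ _
      · exact le_rfl
      · exact le_rfl
    calc pvQc _ ≤ pvQc _ := hS _ _ _ _ _
      _ ≤ pvQc _ := hS _ _ _ _ _
      _ ≤ pvQc _ := hS _ _ _ _ _
      _ ≤ pvQc _ := hS _ _ _ _ _
      _ ≤ pvQc g := pv_qc_mark_le hv y x

theorem pv_length_Sg (f : Nat) (id : Int) (a b : Nat) (c : List (List Int) → Prop)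
    [DecidablePred c] (h : List (List Int)) : (pvSg f id a b c h).length = h.length := by
  unfold pvSg
  split_ifs
  · exact pv_length_path _ _ _ _ _
  · rfl
  · rfl

theorem pv_rect_Sg {W : Nat} (f : Nat) (id : Int) (a b : Nat) (c : List (List Int) → Prop)
    [DecidablePred c] {h : List (List Int)} (hh : pvRect h W) : pvRect (pvSg f id a b c h) W := by
  unfold pvSg
  split_ifs
  · exact pv_rect_path _ hh _ _ _
  · exact hh
  · exact hh

theorem pv_qc_Sg_le {id : Int} (hv : pvP id = false) (f : Nat) (a b : Nat)
    (c : List (List Int) → Prop) [DecidablePred c] (h : List (List Int)) :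
    pvQc (pvSg f id a b c h) ≤ pvQc h := by
  unfold pvSg
  split_ifs
  · exact pv_qc_path_le hv _ _ _ _
  · exact le_rfl
  · exact le_rfl

-- fuel-irrelevance of A's recursive fill, given enough fuel
theorem pv_path_stable {id : Int} (hv : pvP id = false) {W : Nat} :
    ∀ (n : Nat) (g : List (List Int)) (y x : Nat) (f1 f2 : Nat),
      pvRect g W → y < g.length → x < W →
      pvQc g ≤ n → pvQc g ≤ f1 → pvQc g ≤ f2 →
      pvQual g y x = true → pvPath f1 g y x id = pvPath f2 g y x id := by
  intro n
  induction n using Nat.strong_induction_on with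
  | _ n IH =>
  intro g y x f1 f2 hr hy hx hn h1 h2 hq
  have hxg : x < (g.getD y []).length := by rw [pv_getD_length_rect hr hy]; exact hx
  have hq1 : 1 ≤ pvQc g := pv_qc_pos hy hxg hq
  obtain ⟨a, rfl⟩ : ∃ a, f1 = a + 1 := ⟨f1 - 1, by omega⟩
  obtain ⟨b, rfl⟩ : ∃ b, f2 = b + 1 := ⟨f2 - 1, by omega⟩
  rw [pvPath_succ, pvPath_succ]
  have hd0r : pvRect (pvMark g y x id) W := pv_rect_mark hr y x id
  have hd0l : (pvMark g y x id).length = g.length := pv_length_mark g y x id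
  have hqc0 : pvQc (pvMark g y x id) < pvQc g := pv_qc_mark_lt hv hy hxg hq
  have step : ∀ (a' b' : Nat) (c : List (List Int) → Prop) (inst : DecidablePred c)
      (h' : List (List Int)), pvRect h' W → h'.length = g.length →
      pvQc h' ≤ pvQc g - 1 → (c h' → a' < g.length ∧ b' < W) →
      pvSg a id a' b' c h' = pvSg b id a' b' c h' := by
    intro a' b' c inst h' hr' hl' hqc' hbnd
    unfold pvSg
    split_ifs with hc hqq
    · obtain ⟨ha', hb'⟩ := hbnd hc
      exact IH (pvQc h') (by omega) h' a' b' a b hr' (by omega) hb' le_rfl (by omega)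
        (by omega) hqq
    · rfl
    · rfl
  set d0 := pvMark g y x id with hd0
  have e1 : pvSg a id (y - 1) x (fun _ => 0 < y) d0 = pvSg b id (y - 1) x (fun _ => 0 < y) d0 :=
    step _ _ _ _ _ hd0r hd0l (by omega) (fun _ => ⟨by omega, hx⟩)
  rw [e1]
  set g1 := pvSg b id (y - 1) x (fun _ => 0 < y) d0 with hg1
  have hg1r : pvRect g1 W := pv_rect_Sg _ _ _ _ _ hd0r
  have hg1l : g1.length = g.length := (pv_length_Sg _ _ _ _ _ _).trans hd0l
  have hqc1 : pvQc g1 ≤ pvQc g - 1 := le_trans (pv_qc_Sg_le hv _ _ _ _ _) (by omega)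
  have e2 : pvSg a id y (x + 1) (fun h => x + 1 < (h.getD y []).length) g1 =
      pvSg b id y (x + 1) (fun h => x + 1 < (h.getD y []).length) g1 :=
    step _ _ _ _ _ hg1r hg1l hqc1
      (fun hc => ⟨by omega, by rwa [pv_getD_length_rect hg1r (by omega)] at hc⟩)
  rw [e2]
  set g2 := pvSg b id y (x + 1) (fun h => x + 1 < (h.getD y []).length) g1 with hg2
  have hg2r : pvRect g2 W := pv_rect_Sg _ _ _ _ _ hg1r
  have hg2l : g2.length = g.length := (pv_length_Sg _ _ _ _ _ _).trans hg1l
  have hqc2 : pvQc g2 ≤ pvQc g - 1 := le_trans (pv_qc_Sg_le hv _ _ _ _ _) hqc1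
  have e3 : pvSg a id (y + 1) x (fun h => y + 1 < h.length) g2 =
      pvSg b id (y + 1) x (fun h => y + 1 < h.length) g2 :=
    step _ _ _ _ _ hg2r hg2l hqc2 (fun hc => ⟨by omega, hx⟩)
  rw [e3]
  set g3 := pvSg b id (y + 1) x (fun h => y + 1 < h.length) g2 with hg3
  have hg3r : pvRect g3 W := pv_rect_Sg _ _ _ _ _ hg2r
  have hg3l : g3.length = g.length := (pv_length_Sg _ _ _ _ _ _).trans hg2l
  have hqc3 : pvQc g3 ≤ pvQc g - 1 := le_trans (pv_qc_Sg_le hv _ _ _ _ _) hqc2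
  have e4 : pvSg a id y (x - 1) (fun _ => 0 < x) g3 = pvSg b id y (x - 1) (fun _ => 0 < x) g3 :=
    step _ _ _ _ _ hg3r hg3l hqc3 (fun _ => ⟨hy, by omega⟩)
  rw [e4]

-- canonical one-cell step
def pvStep (id : Int) (g : List (List Int)) (c : Nat × Nat) : List (List Int) :=
  if pvQual g c.1 c.2 then pvPath (pvQc g) g c.1 c.2 id else g

theorem pv_path_any {id : Int} (hv : pvP id = false) {W : Nat} {g : List (List Int)}
    {y x : Nat} (hr : pvRect g W) (hy : y < g.length) (hx : x < W) {f : Nat}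
    (hf : pvQc g ≤ f) (hq : pvQual g y x = true) :
    pvPath f g y x id = pvPath (pvQc g) g y x id :=
  pv_path_stable hv (pvQc g) g y x f (pvQc g) hr hy hx le_rfl hf le_rfl hq

theorem pv_qc_step_le {id : Int} (hv : pvP id = false) (g : List (List Int)) (c : Nat × Nat) :
    pvQc (pvStep id g c) ≤ pvQc g := by
  unfold pvStep
  split_ifs
  · exact pv_qc_path_le hv _ _ _ _
  · exact le_rfl

theorem pv_length_step (id : Int) (g : List (List Int)) (c : Nat × Nat) :
    (pvStep id g c).length = g.length := by
  unfold pvStep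
  split_ifs
  · exact pv_length_path _ _ _ _ _
  · rfl

theorem pv_rect_step {W : Nat} (id : Int) {g : List (List Int)} (h : pvRect g W) (c : Nat × Nat) :
    pvRect (pvStep id g c) W := by
  unfold pvStep
  split_ifs
  · exact pv_rect_path _ h _ _ _
  · exact h

theorem pv_rect_foldl {W : Nat} (id : Int) {g : List (List Int)} (h : pvRect g W)
    (cs : List (Nat × Nat)) : pvRect (cs.foldl (pvStep id) g) W := by
  induction cs generalizing g with
  | nil => exact h
  | cons c t ih => exact ih (pv_rect_step id h c)

theorem pv_length_foldl (id : Int) (g : List (List Int)) (cs : List (Nat × Nat)) :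
    (cs.foldl (pvStep id) g).length = g.length := by
  induction cs generalizing g with
  | nil => rfl
  | cons c t ih => rw [List.foldl_cons, ih, pv_length_step]

theorem pv_qc_foldl_le {id : Int} (hv : pvP id = false) (g : List (List Int))
    (cs : List (Nat × Nat)) : pvQc (cs.foldl (pvStep id) g) ≤ pvQc g := by
  induction cs generalizing g with
  | nil => exact le_rfl
  | cons c t ih => exact le_trans (ih _) (pv_qc_step_le hv g c)

-- the guarded neighbour list (up, right, down, left)
def pvNbrs (H W y x : Nat) : List (Nat × Nat) :=
  (if 0 < y then [(y - 1, x)] else []) ++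
  (if x + 1 < W then [(y, x + 1)] else []) ++
  (if y + 1 < H then [(y + 1, x)] else []) ++
  (if 0 < x then [(y, x - 1)] else [])

-- one layer of A's path = fold of the canonical step over the guarded neighbour list
theorem pv_path_unfold {id : Int} (hv : pvP id = false) {W : Nat}
    {g : List (List Int)} {y x : Nat} (hr : pvRect g W) (hy : y < g.length) (hx : x < W)
    (hq : pvQual g y x = true) {f : Nat} (hf : pvQc g ≤ f) :
    pvPath f g y x id =
      (pvNbrs g.length W y x).foldl (pvStep id) (pvMark g y x id) := by
  have hxg : x < (g.getD y []).length := by rw [pv_getD_length_rect hr hy]; exact hx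
  have hq1 : 1 ≤ pvQc g := pv_qc_pos hy hxg hq
  obtain ⟨f', rfl⟩ : ∃ f'', f = f'' + 1 := ⟨f - 1, by omega⟩
  rw [pvPath_succ]
  unfold pvNbrs
  rw [List.foldl_append, List.foldl_append, List.foldl_append]
  set d0 := pvMark g y x id with hd0
  have hd0r : pvRect d0 W := pv_rect_mark hr y x id
  have hd0l : d0.length = g.length := pv_length_mark g y x id
  have hqc0 : pvQc d0 < pvQc g := pv_qc_mark_lt hv hy hxg hq
  have hf' : pvQc g ≤ f' + 1 := hf
  have t1 : pvSg f' id (y - 1) x (fun _ => 0 < y) d0 =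
      ((if 0 < y then [(y - 1, x)] else []) : List (Nat × Nat)).foldl (pvStep id) d0 := by
    unfold pvSg
    by_cases hy0 : 0 < y
    · rw [if_pos hy0, if_pos hy0, List.foldl_cons, List.foldl_nil]
      unfold pvStep
      by_cases hqu : pvQual d0 (y - 1) x = true
      · rw [if_pos hqu, if_pos hqu]
        exact pv_path_any hv hd0r (by omega) hx (by omega) hqu
      · rw [if_neg hqu, if_neg hqu]
    · rw [if_neg hy0, if_neg hy0, List.foldl_nil]
  rw [t1]
  set g1 := ((if 0 < y then [(y - 1, x)] else []) : List (Nat × Nat)).foldl (pvStep id) d0 with hg1d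
  have hg1r : pvRect g1 W := pv_rect_foldl id hd0r _
  have hg1l : g1.length = g.length := (pv_length_foldl id d0 _).trans hd0l
  have hqc1 : pvQc g1 ≤ pvQc g - 1 := le_trans (pv_qc_foldl_le hv d0 _) (by omega)
  have hcond1 : (x + 1 < ((g1 : List (List Int)).getD y []).length) ↔ x + 1 < W := by
    rw [pv_getD_length_rect hg1r (by omega)]
  have t2 : pvSg f' id y (x + 1) (fun h => x + 1 < (h.getD y []).length) g1 =
      ((if x + 1 < W then [(y, x + 1)] else []) : List (Nat × Nat)).foldl (pvStep id) g1 := by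
    unfold pvSg
    by_cases hxw : x + 1 < W
    · rw [if_pos (hcond1.mpr hxw), if_pos hxw, List.foldl_cons, List.foldl_nil]
      unfold pvStep
      by_cases hqu : pvQual g1 y (x + 1) = true
      · rw [if_pos hqu, if_pos hqu]
        exact pv_path_any hv hg1r (by omega) hxw (by omega) hqu
      · rw [if_neg hqu, if_neg hqu]
    · rw [if_neg (fun hc => hxw (hcond1.mp hc)), if_neg hxw, List.foldl_nil]
  rw [t2]
  set g2 := ((if x + 1 < W then [(y, x + 1)] else []) : List (Nat × Nat)).foldl (pvStep id) g1 with hg2d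
  have hg2r : pvRect g2 W := pv_rect_foldl id hg1r _
  have hg2l : g2.length = g.length := (pv_length_foldl id g1 _).trans hg1l
  have hqc2 : pvQc g2 ≤ pvQc g - 1 := le_trans (pv_qc_foldl_le hv g1 _) hqc1
  have hcond2 : (y + 1 < (g2 : List (List Int)).length) ↔ y + 1 < g.length := by rw [hg2l]
  have t3 : pvSg f' id (y + 1) x (fun h => y + 1 < h.length) g2 =
      ((if y + 1 < g.length then [(y + 1, x)] else []) : List (Nat × Nat)).foldl (pvStep id) g2 := by
    unfold pvSg
    by_cases hyh : y + 1 < g.length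
    · rw [if_pos (hcond2.mpr hyh), if_pos hyh, List.foldl_cons, List.foldl_nil]
      unfold pvStep
      by_cases hqu : pvQual g2 (y + 1) x = true
      · rw [if_pos hqu, if_pos hqu]
        exact pv_path_any hv hg2r (by omega) hx (by omega) hqu
      · rw [if_neg hqu, if_neg hqu]
    · rw [if_neg (fun hc => hyh (hcond2.mp hc)), if_neg hyh, List.foldl_nil]
  rw [t3]
  set g3 := ((if y + 1 < g.length then [(y + 1, x)] else []) : List (Nat × Nat)).foldl (pvStep id) g2 with hg3d
  have hg3r : pvRect g3 W := pv_rect_foldl id hg2r _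
  have hg3l : g3.length = g.length := (pv_length_foldl id g2 _).trans hg2l
  have hqc3 : pvQc g3 ≤ pvQc g - 1 := le_trans (pv_qc_foldl_le hv g2 _) hqc2
  have t4 : pvSg f' id y (x - 1) (fun _ => 0 < x) g3 =
      ((if 0 < x then [(y, x - 1)] else []) : List (Nat × Nat)).foldl (pvStep id) g3 := by
    unfold pvSg
    by_cases hx0 : 0 < x
    · rw [if_pos hx0, if_pos hx0, List.foldl_cons, List.foldl_nil]
      unfold pvStep
      by_cases hqu : pvQual g3 y (x - 1) = true
      · rw [if_pos hqu, if_pos hqu]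
        exact pv_path_any hv hg3r (by omega) (by omega) (by omega) hqu
      · rw [if_neg hqu, if_neg hqu]
    · rw [if_neg hx0, if_neg hx0, List.foldl_nil]
  rw [t4]

theorem pv_fill_nil (f : Nat) (g : List (List Int)) (id : Int) : pvFill f g [] id = g := by
  cases f <;> rfl

theorem pv_fill_cons (f : Nat) (g : List (List Int)) (y x : Nat) (rest : List (Nat × Nat))
    (id : Int) :
    pvFill (f + 1) g ((y, x) :: rest) id =
      if pvQual g y x = true then
        pvFill f (pvMark g y x id)
          ((if 0 < y then [(y - 1, x)] else []) ++
           (if x + 1 < ((pvMark g y x id).getD y []).length then [(y, x + 1)] else []) ++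
           (if y + 1 < (pvMark g y x id).length then [(y + 1, x)] else []) ++
           (if 0 < x then [(y, x - 1)] else []) ++ rest) id
      else pvFill f g rest id := rfl

theorem pv_nbrs_len (H W y x : Nat) : (pvNbrs H W y x).length ≤ 4 := by
  unfold pvNbrs
  split_ifs <;> simp

theorem pv_nbrs_bounds {H W y x : Nat} (hy : y < H) (hx : x < W) :
    ∀ c ∈ pvNbrs H W y x, c.1 < H ∧ c.2 < W := by
  unfold pvNbrs
  intro c hc
  simp only [List.mem_append] at hc
  rcases hc with ((hc | hc) | hc) | hc <;> split_ifs at hc <;>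
    simp_all <;> omega

-- main cross lemma: the stack machine processes a block of pending cells exactly as
-- folding the canonical one-cell step over them
theorem pv_fill_fold {id : Int} (hv : pvP id = false) {W : Nat} :
    ∀ (n : Nat) (g : List (List Int)) (cs stack : List (Nat × Nat)) (fB fB' : Nat),
      pvRect g W → (∀ c ∈ cs ++ stack, c.1 < g.length ∧ c.2 < W) →
      5 * pvQc g + cs.length + 2 * stack.length ≤ n →
      5 * pvQc g + cs.length + 2 * stack.length ≤ fB →
      5 * pvQc g + 2 * stack.length ≤ fB' →
      pvFill fB g (cs ++ stack) id = pvFill fB' (cs.foldl (pvStep id) g) stack id := by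
  intro n
  induction n using Nat.strong_induction_on with
  | _ n IH =>
  intro g cs stack fB fB' hr hb hn hfB hfB'
  cases cs with
  | nil =>
    cases stack with
    | nil => rw [List.foldl_nil, List.nil_append, pv_fill_nil, pv_fill_nil]
    | cons c t =>
      rw [List.foldl_nil]
      have h1 := IH (n - 1) (by simp at hn ⊢; omega) g [c] t fB fB' hr
        (by simpa using hb) (by simp at hn ⊢; omega) (by simp at hfB ⊢; omega)
        (by simp at hfB' ⊢; omega)
      have h2 := IH (n - 1) (by simp at hn ⊢; omega) g [c] t fB' fB' hr
        (by simpa using hb) (by simp at hn ⊢; omega) (by simp at hfB' ⊢; omega)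
        (by simp at hfB' ⊢; omega)
      rw [List.nil_append]
      exact (h1.trans h2.symm)
  | cons c cs' =>
    obtain ⟨y, x⟩ := c
    have hbc : y < g.length ∧ x < W := hb (y, x) (by simp)
    obtain ⟨hy, hx⟩ := hbc
    have hxg : x < (g.getD y []).length := by rw [pv_getD_length_rect hr hy]; exact hx
    obtain ⟨fb, rfl⟩ : ∃ fb, fB = fb + 1 := ⟨fB - 1, by simp at hfB; omega⟩
    rw [List.cons_append]
    by_cases hq : pvQual g y x = true
    · have hq1 : 1 ≤ pvQc g := pv_qc_pos hy hxg hq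
      have hqc0 : pvQc (pvMark g y x id) < pvQc g := pv_qc_mark_lt hv hy hxg hq
      have hd0r : pvRect (pvMark g y x id) W := pv_rect_mark hr y x id
      have hd0l : (pvMark g y x id).length = g.length := pv_length_mark g y x id
      rw [pv_fill_cons, if_pos hq]
      have hpush :
          ((if 0 < y then [(y - 1, x)] else []) ++
           (if x + 1 < ((pvMark g y x id).getD y []).length then [(y, x + 1)] else []) ++
           (if y + 1 < (pvMark g y x id).length then [(y + 1, x)] else []) ++
           (if 0 < x then [(y, x - 1)] else []) ++ (cs' ++ stack) : List (Nat × Nat)) =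
          (pvNbrs g.length W y x ++ cs') ++ stack := by
        unfold pvNbrs
        rw [pv_getD_length_rect hd0r (by omega), hd0l]
        simp [List.append_assoc]
      rw [hpush]
      have hnb := pv_nbrs_bounds (H := g.length) (W := W) hy hx
      have hnl := pv_nbrs_len g.length W y x
      have hih := IH (n - 1) (by simp at hn ⊢; omega) (pvMark g y x id)
        (pvNbrs g.length W y x ++ cs') stack fb fB' hd0r
        (by
          intro c hc
          rw [hd0l]
          simp only [List.mem_append] at hc
          rcases hc with (hc | hc) | hc
          · exact hnb c hc
          · exact hb c (by simp [hc])
          · exact hb c (by simp [hc]))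
        (by simp at hn ⊢; omega) (by simp at hfB ⊢; omega) (by omega)
      rw [hih]
      have hfold : (pvNbrs g.length W y x ++ cs').foldl (pvStep id) (pvMark g y x id) =
          ((y, x) :: cs').foldl (pvStep id) g := by
        rw [List.foldl_append, List.foldl_cons]
        have hstep : pvStep id g (y, x) = pvPath (pvQc g) g y x id := by
          unfold pvStep; rw [if_pos hq]
        rw [hstep, pv_path_unfold hv hr hy hx hq le_rfl]
      rw [hfold]
    · rw [pv_fill_cons, if_neg hq]
      rw [List.foldl_cons, show pvStep id g (y, x) = g from by unfold pvStep; rw [if_neg hq]]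
      exact IH (n - 1) (by simp at hn ⊢; omega) g cs' stack fb fB' hr
        (fun c hc => hb c (by simp only [List.mem_append] at hc ⊢; tauto))
        (by simp at hn ⊢; omega) (by simp at hfB ⊢; omega) (by omega)

theorem pv_p_id (c : Nat) : pvP ((c : Int) + 1000) = false := by
  unfold pvP
  simp only [Bool.and_eq_false_iff, decide_eq_false_iff_not, not_le, not_not]
  left
  omega

theorem pv_cellA {id' : Int} (hv : pvP id' = false) {W : Nat} {g : List (List Int)} {y x : Nat}
    (hr : pvRect g W) (hy : y < g.length) (hx : x < W) {F : Nat} (hF : pvQc g ≤ F) :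
    (if pvQual g y x = true then pvPath F g y x id' else g) = pvStep id' g (y, x) := by
  unfold pvStep
  by_cases hq : pvQual g y x = true
  · rw [if_pos hq, if_pos hq]
    exact pv_path_any hv hr hy hx hF hq
  · rw [if_neg hq, if_neg hq]

theorem pv_cellB {id' : Int} (hv : pvP id' = false) {W : Nat} {g : List (List Int)} {y x : Nat}
    (hr : pvRect g W) (hy : y < g.length) (hx : x < W) {F : Nat} (hF : 5 * pvQc g + 1 ≤ F) :
    pvFill F g [(y, x)] id' = pvStep id' g (y, x) := by
  have h := pv_fill_fold hv F g [(y, x)] [] F F hr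
    (by intro cc hcc; simp at hcc; simp [hcc, hy, hx])
    (by simpa using hF) (by simpa using hF) (by simp; omega)
  simpa [pv_fill_nil] using h

-- congruence of the two double scans, inner loop
theorem pv_inner (H W S0 : Nat) (y : Nat) (hy : y < H) :
    ∀ (xs : List Nat), (∀ x ∈ xs, x < W) → ∀ (g : List (List Int)) (c : Nat),
      pvRect g W → g.length = H → pvQc g ≤ S0 →
      (List.foldl (fun (st2 : List (List Int) × Nat) xind =>
          ((if pvQual st2.1 y xind then
              pvPath (S0 + 1) st2.1 y xind ((st2.2 : Int) + 1000) else st2.1), st2.2 + 1))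
          (g, c) xs =
        List.foldl (fun (st2 : List (List Int) × Nat) xind =>
        (pvFill (5 * S0 + 2) st2.1 [(y, xind)] ((st2.2 : Int) + 1000), st2.2 + 1)) (g, c) xs) ∧
      pvRect (List.foldl (fun (st2 : List (List Int) × Nat) xind =>
        (pvFill (5 * S0 + 2) st2.1 [(y, xind)] ((st2.2 : Int) + 1000), st2.2 + 1)) (g, c) xs).1 W ∧ (List.foldl (fun (st2 : List (List Int) × Nat) xind =>
        (pvFill (5 * S0 + 2) st2.1 [(y, xind)] ((st2.2 : Int) + 1000), st2.2 + 1)) (g, c) xs).1.length = H ∧ pvQc (List.foldl (fun (st2 : List (List Int) × Nat) xind =>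
        (pvFill (5 * S0 + 2) st2.1 [(y, xind)] ((st2.2 : Int) + 1000), st2.2 + 1)) (g, c) xs).1 ≤ S0 := by
  intro xs
  induction xs with
  | nil =>
    intro _ g c hr hl hqc
    exact ⟨rfl, hr, hl, hqc⟩
  | cons x xs' ih =>
    intro hxs g c hr hl hqc
    have hx : x < W := hxs x (by simp)
    have hid : pvP ((c : Int) + 1000) = false := pv_p_id c
    have hyg : y < g.length := by omega
    have hA : (if pvQual g y x then pvPath (S0 + 1) g y x ((c : Int) + 1000) else g) =
        pvStep ((c : Int) + 1000) g (y, x) := pv_cellA hid hr hyg hx (by omega)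
    have hB : pvFill (5 * S0 + 2) g [(y, x)] ((c : Int) + 1000) =
        pvStep ((c : Int) + 1000) g (y, x) := pv_cellB hid hr hyg hx (by omega)
    simp only [List.foldl_cons]
    rw [hA, hB]
    exact ih (fun x' hx' => hxs x' (by simp [hx'])) (pvStep ((c : Int) + 1000) g (y, x)) (c + 1)
      (pv_rect_step _ hr _) ((pv_length_step _ g _).trans hl)
      (le_trans (pv_qc_step_le hid g _) hqc)

-- congruence of the two double scans, outer loop
theorem pv_outer (H W S0 : Nat) :
    ∀ (ys : List Nat), (∀ y ∈ ys, y < H) → ∀ (g : List (List Int)) (c : Nat),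
      pvRect g W → g.length = H → pvQc g ≤ S0 →
      List.foldl (fun (st : List (List Int) × Nat) yind =>
          (List.range (st.1.getD yind []).length).foldl
            (fun (st2 : List (List Int) × Nat) xind =>
              ((if pvQual st2.1 yind xind then
                  pvPath (S0 + 1) st2.1 yind xind ((st2.2 : Int) + 1000) else st2.1),
                st2.2 + 1)) st) (g, c) ys =
      List.foldl (fun (st : List (List Int) × Nat) yind =>
          (List.range (st.1.getD yind []).length).foldl
            (fun (st2 : List (List Int) × Nat) xind =>
              (pvFill (5 * S0 + 2) st2.1 [(yind, xind)] ((st2.2 : Int) + 1000), st2.2 + 1)) st)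
        (g, c) ys := by
  intro ys
  induction ys with
  | nil => intro _ g c _ _ _; rfl
  | cons y ys' ih =>
    intro hys g c hr hl hqc
    have hy : y < H := hys y (by simp)
    have hrow : (g.getD y []).length = W := pv_getD_length_rect hr (by omega)
    simp only [List.foldl_cons, hrow]
    obtain ⟨heq, hr', hl', hqc'⟩ := pv_inner H W S0 y hy (List.range W)
      (fun x hx => List.mem_range.mp hx) g c hr hl hqc
    rw [heq]
    rcases hre : List.foldl (fun (st2 : List (List Int) × Nat) xind =>
        (pvFill (5 * S0 + 2) st2.1 [(y, xind)] ((st2.2 : Int) + 1000), st2.2 + 1)) (g, c) (List.range W) with ⟨g', c'⟩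
    rw [hre] at hr' hl' hqc'
    exact ih (fun y' hy' => hys y' (by simp [hy'])) g' c' hr' hl' hqc'

theorem pv_sum_foldl (l : List (List Int)) :
    ∀ a : Nat, l.foldl (fun a r => a + r.length) a = a + (l.map List.length).sum := by
  induction l with
  | nil => intro a; simp
  | cons r t ih => intro a; simp [ih]; omega

theorem pv_qc_le_sum (g : List (List Int)) : pvQc g ≤ (g.map List.length).sum := by
  unfold pvQc
  induction g with
  | nil => simp
  | cons r t ih =>
    simp only [List.map_cons, List.sum_cons]
    exact Nat.add_le_add (List.countP_le_length) ih

-- ===== VERDICT (by name: the statement is the Claim_ definition above) =====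
theorem mark_basins_spec : Claim_equal_mark_basins := by
  intro pdata _ hpre
  unfold Spec_mark_basins mark_basins mark_basins_alt
  have hrect : pvRect pdata ((pdata.headD []).length) := hpre
  have hqc : pvQc pdata ≤ pdata.foldl (fun a r => a + r.length) 0 := by
    rw [pv_sum_foldl]
    simpa using pv_qc_le_sum pdata
  have e := pv_outer pdata.length ((pdata.headD []).length)
    (pdata.foldl (fun a r => a + r.length) 0) (List.range pdata.length)
    (fun y hy => List.mem_range.mp hy) pdata 0 hrect rfl hqc
  exact congrArg Prod.fst e
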